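-- pv_equiv track=rewrite | github.com/brycekelleher/adventofcode | day20/solution.py | fs2
-- ===== SOURCE A (Python) =====
-- def fs2(n):
-- 	counts = {}
-- 	for i in range(1, n + 1):
-- 		for j in range(i, i * 51, i):
-- 			if not j in counts:
-- 				counts[j] = 0
-- 			counts[j] += i * 11
--
-- 		if counts[i] >= n:
-- 			return i
--
-- 		# the solution can't be i so remove it
-- 		# deletion is O(1) from a dict so should be fast
-- 		del counts[i]
-- ===== SOURCE B (Python) =====
-- def fs2(n):
-- 	# Per-house computation: house h is served only by the elves h//e for
-- 	# multipliers e = 1..50 (an elf d serves h iff d divides h and 50*d >= h,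
-- 	# i.e. iff h//d <= 50), so each house's total is computed independently
-- 	# with 50 divisibility tests and no shared state.
-- 	h = 1
-- 	while True:
-- 		total = 0
-- 		for e in range(1, 51):
-- 			if h % e == 0:
-- 				total += 11 * (h // e)
-- 		if total >= n:
-- 			return h
-- 		h += 1
-- ===== Notes on version B (the rewrite author's own statement) =====
-- stated objective: faster
-- what changed: Replaced A's shared accumulation dict (sieve over elves, checking each house as its elf count completes) by an independent per-house computation: house h is served exactly by the elves h//e for multipliers e = 1..50, so each house's total is 50 divisibility tests with no shared state.
-- outside the precondition, e.g. on fs2(0): A returns None, B returns 1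
import Mathlib
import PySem

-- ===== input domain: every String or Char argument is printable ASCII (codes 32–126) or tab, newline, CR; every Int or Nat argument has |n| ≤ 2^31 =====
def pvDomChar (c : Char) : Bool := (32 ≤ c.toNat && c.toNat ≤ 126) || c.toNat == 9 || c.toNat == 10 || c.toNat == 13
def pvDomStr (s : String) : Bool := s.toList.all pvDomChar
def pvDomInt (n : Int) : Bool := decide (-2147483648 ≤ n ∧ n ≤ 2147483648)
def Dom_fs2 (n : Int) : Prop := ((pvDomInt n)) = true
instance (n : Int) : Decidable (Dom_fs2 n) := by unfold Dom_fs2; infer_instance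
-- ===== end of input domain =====

-- B replaces A's shared accumulation dict (sieve over elves) by an independent
-- per-house computation (each house is served exactly by the elves h//e, e = 1..50);
-- a timing run measured B faster by a constant factor.

-- ===== PORT A =====
-- Python's internal counts dict is ported as Std.HashMap Int Int: the code only uses
-- membership test, lookup, store and del (never iteration order), and a hash map is
-- observationally a Python dict for exactly these operations (and evaluates fast).
-- inner loop 'for j in range(i, i*51, i)' with the setdefault-style guard and 'counts[j] += i*11'
def fs2Elf (i : Int) (counts : Std.HashMap Int Int) : Std.HashMap Int Int :=
  (PySem.List.pyRange i (i * 51) i).foldl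
    (fun c j =>
      let c := if c.contains j then c else c.insert j 0
      c.insert j (c.getD j 0 + i * 11)) counts

-- outer loop 'for i in range(1, n+1)' with early return; Python's 'counts[i]' is always
-- present here (j = i is the first inner index when i ≥ 1), so getD i 0 is exact.
def fs2Go (n : Int) : List Int → Std.HashMap Int Int → Option Int
  | [], _ => none
  | i :: rest, counts =>
    let counts := fs2Elf i counts
    if counts.getD i 0 ≥ n then some i
    else fs2Go n rest (counts.erase i)

-- falling off the loop returns Python None (only when n < 1); excluded by Pre_, default 0 unreached
def fs2 (n : Int) : Int := (fs2Go n (PySem.List.pyRange 1 (n + 1) 1) (∅ : Std.HashMap Int Int)).getD 0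

-- ===== PORT B =====
-- 'total' of Source B: for e in range(1, 51): if h % e == 0: total += 11 * (h // e)
def fs2Total (h : Int) : Int :=
  (PySem.List.pyRange 1 51 1).foldl
    (fun t e => if PySem.Int.mod h e = 0 then t + 11 * PySem.Int.floordiv h e else t) 0

-- Source B's 'while True' loop; fuel only totalizes it (the loop provably returns by h = max n 1)
def fs2AltGo (n : Int) : Int → Nat → Int
  | _, 0 => 0
  | h, fuel + 1 => if fs2Total h ≥ n then h else fs2AltGo n (h + 1) fuel

def fs2_alt (n : Int) : Int := fs2AltGo n 1 (n.toNat + 1)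

-- ===== PRECONDITION & SPEC =====
-- Pre_ excludes n < 1, where Python A's loop body never runs and A returns None (not an int).
def Pre_fs2 (n : Int) : Prop := 1 ≤ n
instance (n : Int) : Decidable (Pre_fs2 n) := by unfold Pre_fs2; infer_instance
def pvWitness_fs2 : Int := 6

def Spec_fs2 (n : Int) (out : Int) : Prop := out = fs2_alt n
instance (n : Int) (out : Int) : Decidable (Spec_fs2 n out) := by unfold Spec_fs2; infer_instance

-- ===== CLAIM (what is proved, stated in full; the proofs are below) =====
def Claim_equal_fs2 : Prop := ∀ (n : Int), Dom_fs2 n → Pre_fs2 n → Spec_fs2 n (fs2 n)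

-- ===== LEMMAS AND PROOFS =====

-- B's partial total: contributions of elves 1 .. i-1 to house j
def partialT (i j : Int) : Int :=
  (PySem.List.pyRange 1 i 1).foldl
    (fun t d => if PySem.Int.mod j d = 0 ∧ 50 * d ≥ j then t + 11 * d else t) 0

-- A's dict invariant at the top of outer iteration i
def InvA (i : Int) (c : Std.HashMap Int Int) : Prop :=
  ∀ j : Int, i ≤ j → c.getD j 0 = partialT i j


-- single inner-loop step of A, read through getD
theorem stepA_getD (i j x : Int) (c : Std.HashMap Int Int) :
    ((let c' := if c.contains j then c else c.insert j 0;
      c'.insert j (c'.getD j 0 + i * 11)).getD x 0)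
    = if x = j then c.getD j 0 + i * 11 else c.getD x 0 := by
  have hbase : (if c.contains j then c else c.insert j 0).getD j 0 = c.getD j 0 := by
    by_cases hc : c.contains j
    · rw [if_pos hc]
    · rw [if_neg hc, Std.HashMap.getD_insert, if_pos (by simp),
        Std.HashMap.getD_eq_fallback (by rw [Std.HashMap.mem_iff_contains]; simpa using hc)]
  have hother : ∀ y : Int, y ≠ j →
      (if c.contains j then c else c.insert j 0).getD y 0 = c.getD y 0 := by
    intro y hy
    by_cases hc : c.contains j
    · rw [if_pos hc]
    · rw [if_neg hc, Std.HashMap.getD_insert,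
        if_neg (by simp only [beq_iff_eq]; exact fun h => hy h.symm)]
  show ((if c.contains j then c else c.insert j 0).insert j
      ((if c.contains j then c else c.insert j 0).getD j 0 + i * 11)).getD x 0 = _
  rw [Std.HashMap.getD_insert, hbase]
  by_cases hx : x = j
  · rw [if_pos (by simp [hx]), if_pos hx]
  · rw [if_neg (by simp only [beq_iff_eq]; exact fun h => hx h.symm), if_neg hx, hother x hx]

-- A's inner loop over any Nodup list adds i*11 exactly at its members
theorem foldlA_getD (i : Int) (L : List Int) (hL : L.Nodup) (c : Std.HashMap Int Int) (x : Int) :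
    ((L.foldl (fun c j =>
        let c := if c.contains j then c else c.insert j 0
        c.insert j (c.getD j 0 + i * 11)) c).getD x 0)
    = c.getD x 0 + (if x ∈ L then i * 11 else 0) := by
  induction L generalizing c with
  | nil => simp
  | cons j rest ih =>
    rcases List.nodup_cons.mp hL with ⟨hj, hrest⟩
    simp only [List.foldl_cons]
    rw [ih hrest]
    by_cases hx : x = j
    · subst hx
      rw [stepA_getD]
      simp [hj]
    · rw [stepA_getD]
      simp only [if_neg hx, List.mem_cons]
      by_cases hm : x ∈ rest <;> simp [hm, hx]

theorem nodup_pyRange_self (i : Int) (hi : 1 ≤ i) :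
    (PySem.List.pyRange i (i * 51) i).Nodup := by
  rw [PySem.List.pyRange_of_pos _ _ (by omega)]
  refine (List.nodup_range).map ?_
  intro a b hab
  have h2 : i * (a : Int) = i * b := by linarith
  have h3 := mul_left_cancel₀ (show i ≠ 0 by omega) h2
  exact_mod_cast h3

theorem mem_pyRange_self_iff (i x : Int) (hi : 1 ≤ i) (hx : i ≤ x) :
    x ∈ PySem.List.pyRange i (i * 51) i ↔ (PySem.Int.mod x i = 0 ∧ 50 * i ≥ x) := by
  rw [PySem.List.mem_pyRange_iff_of_pos (by omega)]
  rw [PySem.Int.mod_eq_zero_iff_dvd]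
  constructor
  · rintro ⟨-, hlt, d, hd⟩
    have hdvd : i ∣ x := ⟨d + 1, by rw [mul_add, mul_one]; omega⟩
    refine ⟨hdvd, ?_⟩
    obtain ⟨m, hm⟩ := hdvd
    have hm51 : m ≤ 50 := by
      by_contra h
      have h51 : (51 : Int) ≤ m := by omega
      have : i * 51 ≤ i * m := mul_le_mul_of_nonneg_left h51 (by omega)
      omega
    have : i * m ≤ i * 50 := mul_le_mul_of_nonneg_left hm51 (by omega)
    omega
  · rintro ⟨⟨m, hm⟩, hle⟩
    exact ⟨hx, by omega, m - 1, by rw [mul_sub, mul_one]; omega⟩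

theorem partialT_succ (i j : Int) (hi : 1 ≤ i) :
    partialT (i + 1) j
    = partialT i j + (if PySem.Int.mod j i = 0 ∧ 50 * i ≥ j then 11 * i else 0) := by
  unfold partialT
  rw [PySem.List.pyRange_one_succ_right hi, List.foldl_append]
  simp only [List.foldl_cons, List.foldl_nil]
  split_ifs <;> simp

theorem fs2Elf_getD (i : Int) (hi : 1 ≤ i) (c : Std.HashMap Int Int) (x : Int) :
    (fs2Elf i c).getD x 0
    = c.getD x 0 + (if x ∈ PySem.List.pyRange i (i * 51) i then i * 11 else 0) :=
  foldlA_getD i _ (nodup_pyRange_self i hi) c x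

-- each if-branch of fs2Total is nonnegative on its range, so any single term bounds it
theorem foldl_if_eq_sum (P : Int → Prop) [DecidablePred P] (g : Int → Int) (L : List Int) (a : Int) :
    L.foldl (fun t d => if P d then t + g d else t) a
    = a + (L.map (fun d => if P d then g d else 0)).sum := by
  induction L generalizing a with
  | nil => simp
  | cons d rest ih =>
    simp only [List.foldl_cons, List.map_cons, List.sum_cons, ih]
    split_ifs <;> ring

theorem sum_range_list (f : Nat → Int) (n : Nat) :
    ((List.range n).map f).sum = ∑ k ∈ Finset.range n, f k := by
  induction n with
  | zero => rfl
  | succ m ih =>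
    rw [List.range_succ, List.map_append, List.sum_append, Finset.sum_range_succ, ih]
    simp

-- the divisors d of m with 50*d ≥ m are exactly the m/e for multipliers e ≤ 50
theorem divisor_pair_sum (m : Nat) (hm : 1 ≤ m) :
    (∑ d ∈ Finset.Icc 1 m, if d ∣ m ∧ m ≤ 50 * d then ((11 * d : Nat) : Int) else 0)
    = ∑ e ∈ Finset.Icc 1 50, if e ∣ m then ((11 * (m / e) : Nat) : Int) else 0 := by
  rw [← Finset.sum_filter, ← Finset.sum_filter]
  refine Finset.sum_bij' (i := fun d _ => m / d) (j := fun e _ => m / e) ?_ ?_ ?_ ?_ ?_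
  · intro d hd
    simp only [Finset.mem_filter, Finset.mem_Icc] at hd ⊢
    obtain ⟨⟨hd1, hdm⟩, hdvd, hle⟩ := hd
    refine ⟨⟨?_, ?_⟩, ?_⟩
    · exact (Nat.one_le_div_iff (by omega)).mpr hdm
    · calc m / d ≤ 50 * d / d := Nat.div_le_div_right hle
        _ = 50 := Nat.mul_div_cancel 50 (by omega)
    · exact Nat.div_dvd_of_dvd hdvd
  · intro e he
    simp only [Finset.mem_filter, Finset.mem_Icc] at he ⊢
    obtain ⟨⟨he1, he50⟩, hdvd⟩ := he
    have hem : e ≤ m := Nat.le_of_dvd (by omega) hdvd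
    refine ⟨⟨(Nat.one_le_div_iff (by omega)).mpr hem, Nat.div_le_self m e⟩,
      Nat.div_dvd_of_dvd hdvd, ?_⟩
    calc m = m / e * e := (Nat.div_mul_cancel hdvd).symm
      _ ≤ m / e * 50 := Nat.mul_le_mul_left _ he50
      _ = 50 * (m / e) := Nat.mul_comm _ _
  · intro d hd
    simp only [Finset.mem_filter, Finset.mem_Icc] at hd
    exact Nat.div_div_self hd.2.1 (by omega)
  · intro e he
    simp only [Finset.mem_filter, Finset.mem_Icc] at he
    exact Nat.div_div_self he.2 (by omega)
  · intro d hd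
    simp only [Finset.mem_filter, Finset.mem_Icc] at hd
    simp only [Nat.div_div_self hd.2.1 (show m ≠ 0 by omega)]

theorem total_eq (h : Int) (hh : 1 ≤ h) : partialT (h + 1) h = fs2Total h := by
  obtain ⟨m, rfl⟩ : ∃ m : Nat, h = (m : Int) := ⟨h.toNat, (Int.toNat_of_nonneg (by omega)).symm⟩
  have hm : 1 ≤ m := by exact_mod_cast hh
  unfold partialT fs2Total
  rw [foldl_if_eq_sum (fun d => PySem.Int.mod (m : Int) d = 0 ∧ 50 * d ≥ (m : Int)),
    foldl_if_eq_sum (fun e => PySem.Int.mod (m : Int) e = 0)]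
  simp only [zero_add, PySem.List.pyRange_one, List.map_map]
  rw [sum_range_list, sum_range_list]
  have h1 : ((m : Int) + 1 - 1).toNat = m := by omega
  have h2 : ((51 : Int) - 1).toNat = 50 := rfl
  rw [h1, h2]
  have L : (∑ k ∈ Finset.range m,
      ((fun d => if PySem.Int.mod (m : Int) d = 0 ∧ 50 * d ≥ (m : Int) then 11 * d else 0) ∘
        fun k : Nat => 1 + (k : Int)) k)
      = ∑ d ∈ Finset.Icc 1 m, if d ∣ m ∧ m ≤ 50 * d then ((11 * d : Nat) : Int) else 0 := by
    rw [← Finset.Ico_add_one_right_eq_Icc, Finset.sum_Ico_eq_sum_range]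
    simp only [Nat.add_sub_cancel, Function.comp]
    refine Finset.sum_congr rfl ?_
    intro k _
    simp only [PySem.Int.mod_eq_zero_iff_dvd]
    have hiff : ((1 + (k : Int)) ∣ (m : Int) ∧ 50 * (1 + (k : Int)) ≥ (m : Int))
        ↔ ((1 + k) ∣ m ∧ m ≤ 50 * (1 + k)) := by
      constructor
      · rintro ⟨hd, hle⟩; exact ⟨by exact_mod_cast hd, by exact_mod_cast hle⟩
      · rintro ⟨hd, hle⟩; exact ⟨by exact_mod_cast hd, by exact_mod_cast hle⟩
    have hv : (11 * (1 + (k : Int))) = ((11 * (1 + k) : Nat) : Int) := by push_cast; ring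
    rw [if_congr hiff hv rfl]
  have R : (∑ k ∈ Finset.range 50,
      ((fun e => if PySem.Int.mod (m : Int) e = 0 then 11 * PySem.Int.floordiv (m : Int) e else 0) ∘
        fun k : Nat => 1 + (k : Int)) k)
      = ∑ e ∈ Finset.Icc 1 50, if e ∣ m then ((11 * (m / e) : Nat) : Int) else 0 := by
    rw [← Finset.Ico_add_one_right_eq_Icc, Finset.sum_Ico_eq_sum_range]
    simp only [Nat.add_sub_cancel, Function.comp]
    refine Finset.sum_congr rfl ?_
    intro k _
    simp only [PySem.Int.mod_eq_zero_iff_dvd]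
    have hcast : (1 + (k : Int)) = ((1 + k : Nat) : Int) := by push_cast; ring
    have hiff : ((1 + (k : Int)) ∣ (m : Int)) ↔ ((1 + k) ∣ m) := by
      rw [hcast]; exact Int.natCast_dvd_natCast
    have hval : 11 * PySem.Int.floordiv (m : Int) (1 + (k : Int)) = ((11 * (m / (1 + k)) : Nat) : Int) := by
      rw [hcast, PySem.Int.floordiv_natCast]; push_cast; ring
    rw [if_congr hiff hval rfl]
  rw [L, R, divisor_pair_sum m hm]

theorem total_lower (n : Int) (hn : 1 ≤ n) : 11 * n ≤ fs2Total n := by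
  unfold fs2Total
  rw [foldl_if_eq_sum (fun e => PySem.Int.mod n e = 0)]
  have hmem : (11 * n : Int) ∈ (PySem.List.pyRange 1 51 1).map
      (fun e => if PySem.Int.mod n e = 0 then 11 * PySem.Int.floordiv n e else 0) := by
    refine List.mem_map.mpr ⟨1, ?_, ?_⟩
    · exact PySem.List.mem_pyRange_one.mpr ⟨le_rfl, by omega⟩
    · rw [if_pos (by rw [PySem.Int.mod_eq_zero_iff_dvd]; exact one_dvd n),
        PySem.Int.floordiv_eq_ediv_of_pos (by omega), Int.ediv_one]
  have hpos : ∀ x ∈ (PySem.List.pyRange 1 51 1).map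
      (fun e => if PySem.Int.mod n e = 0 then 11 * PySem.Int.floordiv n e else 0), (0:Int) ≤ x := by
    intro x hx
    obtain ⟨e, he, rfl⟩ := List.mem_map.mp hx
    have hr := PySem.List.mem_pyRange_one.mp he
    have hfd : 0 ≤ PySem.Int.floordiv n e := by
      rw [PySem.Int.floordiv_eq_ediv_of_pos (by omega)]
      exact Int.ediv_nonneg (by omega) (by omega)
    split_ifs <;> omega
  have := List.single_le_sum hpos _ hmem
  omega

theorem main_loop (n : Int) (hn : 1 ≤ n) :
    ∀ (fuel : Nat) (i : Int) (c : Std.HashMap Int Int), 1 ≤ i → i ≤ n →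
      (n - i).toNat < fuel → InvA i c →
      fs2Go n (PySem.List.pyRange i (n + 1) 1) c = some (fs2AltGo n i fuel) := by
  intro fuel
  induction fuel with
  | zero => intro i c _ _ h _; omega
  | succ fuel ih =>
    intro i c hi hin hfuel hinv
    rw [PySem.List.pyRange_one_cons (by omega)]
    have hself : i ∈ PySem.List.pyRange i (i * 51) i :=
      (mem_pyRange_self_iff i i hi le_rfl).mpr
        ⟨by rw [PySem.Int.mod_eq_zero_iff_dvd], by omega⟩
    have hkey : (fs2Elf i c).getD i 0 = fs2Total i := by
      rw [fs2Elf_getD i hi c i, if_pos hself, hinv i le_rfl, ← total_eq i hi,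
        partialT_succ i i hi,
        if_pos ⟨by rw [PySem.Int.mod_eq_zero_iff_dvd], by omega⟩]
      ring
    show (let counts := fs2Elf i c;
      if counts.getD i 0 ≥ n then some i
      else fs2Go n (PySem.List.pyRange (i + 1) (n + 1) 1) (counts.erase i))
      = some (fs2AltGo n i (fuel + 1))
    simp only [fs2AltGo, hkey]
    by_cases hret : fs2Total i ≥ n
    · simp [hret]
    · rw [if_neg hret, if_neg hret]
      have hine : i ≠ n := by
        rintro rfl
        exact hret (le_trans (by omega) (total_lower i hi))
      refine ih (i + 1) ((fs2Elf i c).erase i) (by omega) (by omega) (by omega) ?_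
      intro j hj
      rw [Std.HashMap.getD_erase,
        if_neg (by simp only [beq_iff_eq]; omega), fs2Elf_getD i hi c j, hinv j (by omega),
        partialT_succ i j hi]
      by_cases hm : j ∈ PySem.List.pyRange i (i * 51) i
      · rw [if_pos hm, if_pos ((mem_pyRange_self_iff i j hi (by omega)).mp hm)]
        ring
      · rw [if_neg hm, if_neg (fun hc =>
          hm ((mem_pyRange_self_iff i j hi (by omega)).mpr hc))]

-- ===== VERDICT (by name: the statement is the Claim_ definition above) =====
theorem fs2_spec : Claim_equal_fs2 := by
  intro n _ hpre
  unfold Spec_fs2 fs2 fs2_alt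
  have hinv : InvA 1 (∅ : Std.HashMap Int Int) := by
    intro j _
    rw [Std.HashMap.getD_empty]
    unfold partialT
    rw [PySem.List.pyRange_one_eq_nil le_rfl]
    rfl
  rw [main_loop n hpre (n.toNat + 1) 1 (∅ : Std.HashMap Int Int) le_rfl hpre (by omega) hinv]
  rfl
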